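-- pv_equiv track=rewrite | github.com/edgemind-sas/muscadet | muscadet/obj.py | _factorize_target_names
-- ===== SOURCE A (Python) =====
-- def _factorize_target_names(
--     targets: list[str], rep_char="X", ignored_char=["_"], concat_char=["__"]
-- ) -> str:
--     """
--     Creates a factorized name from a list of target component names.
--
--     This utility method generates a compact representation of multiple target
--     names by identifying common patterns and replacing differing characters
--     with a placeholder. This is particularly useful for failure modes that
--     affect multiple similar components.
--
--     The algorithm works as follows:
--     1. If targets have different lengths, concatenate with separator
--     2. For same-length targets, compare character by character
--     3. Keep common characters, replace differences with rep_char
--     4. Ignore specified characters (like underscores) during comparison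
--
--     Parameters
--     ----------
--     targets : list[str]
--         List of target component names to factorize
--     rep_char : str, optional
--         Character to use for differing positions (default: "X")
--     ignored_char : list[str], optional
--         Characters to ignore during comparison (default: ["_"])
--     concat_char : list[str], optional
--         Characters to use for concatenation when lengths differ (default: ["__"])
--
--     Returns
--     -------
--     str
--         Factorized name representing all targets
--
--     Examples
--     --------
--     >>> _factorize_target_names(["pump1", "pump2", "pump3"])
--     "pumpX"
--
--     >>> _factorize_target_names(["motor_A1", "motor_B1"])
--     "motor_X1"
--
--     >>> _factorize_target_names(["component1", "very_long_name"])
--     "component1__very_long_name"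
--     """
--     if not targets:
--         return ""
--     if len(targets) == 1:
--         return targets[0]
--
--     first_len = len(targets[0])
--     # If targets have different lengths, concatenate them
--     if not all(len(t) == first_len for t in targets):
--         return concat_char[0].join(targets)
--
--     # Character-by-character comparison for same-length targets
--     result_chars = []
--     for i in range(first_len):
--         ref_char = targets[0][i]
--
--         # Skip ignored characters (keep them as-is)
--         if ref_char in ignored_char:
--             result_chars.append(ref_char)
--             continue
--
--         # Check if character is common across all targets
--         is_common = all(t[i] == ref_char for t in targets)
--
--         if is_common:
--             result_chars.append(ref_char)
--         else:
--             result_chars.append(rep_char)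
--
--     return "".join(result_chars)
-- ===== SOURCE B (Python) =====
-- def _factorize_target_names(
--     targets: list[str], rep_char="X", ignored_char=["_"], concat_char=["__"]
-- ) -> str:
--     if not targets:
--         return ""
--     if len(targets) == 1:
--         return targets[0]
--     ref = targets[0]
--     if any(len(t) != len(ref) for t in targets):
--         return concat_char[0].join(targets)
--     # Stage 1: one pass over the other targets collecting the SET of positions
--     # where any of them disagrees with the reference string.
--     diff = set()
--     for t in targets[1:]:
--         for i, (a, b) in enumerate(zip(ref, t)):
--             if a != b:
--                 diff.add(i)
--     # Stage 2: rewrite the reference string using that index set.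
--     return "".join(
--         c if c in ignored_char or i not in diff else rep_char
--         for i, c in enumerate(ref)
--     )
-- ===== Notes on version B (the rewrite author's own statement) =====
-- stated objective: alternative
-- what changed: Replaces A's per-position inner scan over all targets with a two-stage algorithm: one pass over the non-reference targets builds a set of differing positions, then a second pass rewrites the reference string from that index set.
import Mathlib
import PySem

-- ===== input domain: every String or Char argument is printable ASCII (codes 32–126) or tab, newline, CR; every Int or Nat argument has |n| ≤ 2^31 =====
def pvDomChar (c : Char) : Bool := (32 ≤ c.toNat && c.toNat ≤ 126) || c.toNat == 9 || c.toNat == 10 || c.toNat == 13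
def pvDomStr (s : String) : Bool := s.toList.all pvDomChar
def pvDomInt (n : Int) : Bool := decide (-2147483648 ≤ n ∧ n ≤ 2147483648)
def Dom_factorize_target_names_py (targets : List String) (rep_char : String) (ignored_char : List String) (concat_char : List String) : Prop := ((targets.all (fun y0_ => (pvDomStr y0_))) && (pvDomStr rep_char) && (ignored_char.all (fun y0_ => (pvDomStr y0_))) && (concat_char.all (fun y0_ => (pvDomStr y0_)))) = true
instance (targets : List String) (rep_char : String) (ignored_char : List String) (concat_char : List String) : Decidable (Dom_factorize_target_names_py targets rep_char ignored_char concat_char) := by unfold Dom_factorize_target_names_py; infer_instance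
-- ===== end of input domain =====

-- B replaces A's per-position scan over all targets by two stages: one pass over the
-- non-reference targets collects the set of differing positions, then the reference
-- string is rewritten from that index set; objective: alternative (same cost).


-- ===== PORT A =====
def factorize_target_names_py (targets : List String) (rep_char : String) (ignored_char : List String) (concat_char : List String) : String :=
  if targets.isEmpty then ""
  else if targets.length == 1 then targets.headD ""
  else
    let first_len := PySem.Str.len (targets.headD "")
    if !(targets.all fun t => PySem.Str.len t == first_len) then
      -- concat_char[0]: Pre_ puts concat_char ≠ [] on this branch (Python raises IndexError there)
      PySem.Str.join (concat_char.headD "") targets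
    else
      let result_chars := (PySem.List.pyRange 0 first_len).foldl (fun acc i =>
        -- targets[0][i] / t[i]: i ∈ range(first_len) and all lengths equal first_len, so never none
        let ref := (PySem.Str.pyGet? (targets.headD "") i).getD ' '
        if ignored_char.contains (String.ofList [ref]) then acc ++ [String.ofList [ref]]
        else if targets.all (fun t => (PySem.Str.pyGet? t i).getD ' ' == ref) then acc ++ [String.ofList [ref]]
        else acc ++ [rep_char]) []
      PySem.Str.join "" result_chars

-- ===== PORT B =====
-- stage 1 of B: the set of positions at which some non-reference target differs from the reference
def pvDiffSet (ref : List Char) (rest : List String) : PySem.Set Int :=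
  rest.foldl (fun s t =>
    (PySem.List.enumerate (ref.zip t.toList)).foldl
      (fun s p => if p.2.1 != p.2.2 then PySem.Set.add s p.1 else s) s)
    PySem.Set.empty

def factorize_target_names_py_alt (targets : List String) (rep_char : String) (ignored_char : List String) (concat_char : List String) : String :=
  match targets with
  | [] => ""
  | [t] => t
  | t0 :: t1 :: ts =>
    if (t0 :: t1 :: ts).any (fun t => PySem.Str.len t != PySem.Str.len t0) then
      PySem.Str.join (concat_char.headD "") (t0 :: t1 :: ts)
    else
      let diff := pvDiffSet t0.toList (t1 :: ts)
      PySem.Str.join "" ((PySem.List.enumerate t0.toList).map (fun p =>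
        if ignored_char.contains (String.ofList [p.2]) || !(PySem.Set.contains diff p.1)
        then String.ofList [p.2] else rep_char))

-- ===== PRECONDITION & SPEC =====
-- Pre_ excludes exactly the inputs where A raises IndexError on concat_char[0]:
-- two or more targets of differing lengths together with an empty concat_char list.
def Pre_factorize_target_names_py (targets : List String) (rep_char : String) (ignored_char : List String) (concat_char : List String) : Prop :=
  targets.length ≤ 1 ∨ (targets.all fun t => PySem.Str.len t == PySem.Str.len (targets.headD "")) = true ∨ concat_char ≠ []
instance (targets : List String) (rep_char : String) (ignored_char : List String) (concat_char : List String) : Decidable (Pre_factorize_target_names_py targets rep_char ignored_char concat_char) := by unfold Pre_factorize_target_names_py; infer_instance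
def pvWitness_factorize_target_names_py : List String × String × List String × List String := (["pump_1", "pump_2"], "X", ["_"], ["__"])

def Spec_factorize_target_names_py (targets : List String) (rep_char : String) (ignored_char : List String) (concat_char : List String) (out : String) : Prop := out = factorize_target_names_py_alt targets rep_char ignored_char concat_char
instance (targets : List String) (rep_char : String) (ignored_char : List String) (concat_char : List String) (out : String) : Decidable (Spec_factorize_target_names_py targets rep_char ignored_char concat_char out) := by unfold Spec_factorize_target_names_py; infer_instance

-- ===== CLAIM (what is proved, stated in full; the proofs are below) =====
def Claim_equal_factorize_target_names_py : Prop := ∀ (targets : List String) (rep_char : String) (ignored_char : List String) (concat_char : List String), Dom_factorize_target_names_py targets rep_char ignored_char concat_char → Pre_factorize_target_names_py targets rep_char ignored_char concat_char → Spec_factorize_target_names_py targets rep_char ignored_char concat_char (factorize_target_names_py targets rep_char ignored_char concat_char)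

-- ===== LEMMAS AND PROOFS =====

-- membership in B's inner per-target loop
lemma mem_innerFold (l : List (Int × (Char × Char))) (s : PySem.Set Int) (x : Int) :
    x ∈ l.foldl (fun s p => if p.2.1 != p.2.2 then PySem.Set.add s p.1 else s) s ↔
      x ∈ s ∨ ∃ p ∈ l, p.2.1 ≠ p.2.2 ∧ x = p.1 := by
  induction l generalizing s with
  | nil => simp
  | cons q l ih =>
    rw [List.foldl_cons]
    by_cases hq : q.2.1 = q.2.2
    · rw [if_neg (by simp [hq]), ih]
      constructor
      · rintro (h | ⟨p, hp, hne, rfl⟩)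
        · exact Or.inl h
        · exact Or.inr ⟨p, List.mem_cons_of_mem _ hp, hne, rfl⟩
      · rintro (h | ⟨p, hp, hne, rfl⟩)
        · exact Or.inl h
        · rcases List.mem_cons.mp hp with rfl | hp
          · exact absurd hq hne
          · exact Or.inr ⟨p, hp, hne, rfl⟩
    · rw [if_pos (by simp [hq]), ih, PySem.Set.mem_add]
      constructor
      · rintro (⟨h | rfl⟩ | ⟨p, hp, hne, rfl⟩)
        · exact Or.inl h
        · exact Or.inr ⟨q, List.mem_cons_self, hq, rfl⟩
        · exact Or.inr ⟨p, List.mem_cons_of_mem _ hp, hne, rfl⟩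
      · rintro (h | ⟨p, hp, hne, rfl⟩)
        · exact Or.inl (Or.inl h)
        · rcases List.mem_cons.mp hp with rfl | hp
          · exact Or.inl (Or.inr rfl)
          · exact Or.inr ⟨p, hp, hne, rfl⟩

-- membership in pvDiffSet: some non-reference target differs from the reference at that index
lemma mem_pvDiffSet (ref : List Char) (rest : List String) (x : Int) :
    x ∈ pvDiffSet ref rest ↔
      ∃ t ∈ rest, ∃ p ∈ PySem.List.enumerate (ref.zip t.toList), p.2.1 ≠ p.2.2 ∧ x = p.1 := by
  unfold pvDiffSet
  suffices h : ∀ (s : PySem.Set Int),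
      x ∈ rest.foldl (fun s t =>
        (PySem.List.enumerate (ref.zip t.toList)).foldl
          (fun s p => if p.2.1 != p.2.2 then PySem.Set.add s p.1 else s) s) s ↔
      x ∈ s ∨ ∃ t ∈ rest, ∃ p ∈ PySem.List.enumerate (ref.zip t.toList), p.2.1 ≠ p.2.2 ∧ x = p.1 by
    simpa [PySem.Set.empty] using h PySem.Set.empty
  induction rest with
  | nil => simp
  | cons t rest ih =>
    intro s
    simp only [List.foldl_cons, ih, mem_innerFold, List.mem_cons]
    constructor
    · rintro ((h | h) | ⟨u, hu, h⟩)
      · exact Or.inl h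
      · exact Or.inr ⟨t, Or.inl rfl, h⟩
      · exact Or.inr ⟨u, Or.inr hu, h⟩
    · rintro (h | ⟨u, (rfl | hu), h⟩)
      · exact Or.inl (Or.inl h)
      · exact Or.inl (Or.inr h)
      · exact Or.inr ⟨u, hu, h⟩

-- for equal-length targets and an in-range Nat index, membership is a plain per-character fact
lemma mem_pvDiffSet_nat (ref : List Char) (rest : List String) (k : Nat)
    (hk : k < ref.length) (hlen : ∀ t ∈ rest, t.toList.length = ref.length) :
    (k : Int) ∈ pvDiffSet ref rest ↔ ∃ t ∈ rest, t.toList[k]? ≠ some ref[k] := by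
  rw [mem_pvDiffSet]
  constructor
  · rintro ⟨t, ht, p, hp, hne, heq⟩
    rcases (PySem.List.mem_enumerate_iff _ _ _).mp hp with ⟨j, hj, rfl⟩
    simp only [zero_add] at heq hne
    have hjk : j = k := by exact_mod_cast heq.symm
    subst hjk
    refine ⟨t, ht, ?_⟩
    have hjt : j < t.toList.length := by rw [hlen t ht]; omega
    rw [List.getElem?_eq_getElem hjt]
    simp only [List.getElem_zip] at hne
    intro hc
    exact hne (by injection hc with h; exact h.symm)
  · rintro ⟨t, ht, hne⟩
    have hkz : k < (ref.zip t.toList).length := by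
      rw [List.length_zip, hlen t ht]; omega
    refine ⟨t, ht, (0 + (k : Int), (ref.zip t.toList)[k]),
      (PySem.List.mem_enumerate_iff _ _ _).mpr ⟨k, hkz, rfl⟩, ?_, by simp⟩
    simp only [List.getElem_zip]
    intro hc
    apply hne
    rw [List.getElem?_eq_getElem (by rw [hlen t ht]; omega), hc]

-- A's loop body is 'append one string per index'
lemma A_body_eq (t0 : String) (targets : List String) (rep_char : String) (ignored_char : List String) :
    (fun (acc : List String) (i : Int) =>
      let ref := (PySem.Str.pyGet? t0 i).getD ' '
      if ignored_char.contains (String.ofList [ref]) then acc ++ [String.ofList [ref]]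
      else if targets.all (fun t => (PySem.Str.pyGet? t i).getD ' ' == ref) then acc ++ [String.ofList [ref]]
      else acc ++ [rep_char]) =
    (fun (acc : List String) (i : Int) =>
      acc ++ [let ref := (PySem.Str.pyGet? t0 i).getD ' '
        if ignored_char.contains (String.ofList [ref]) then String.ofList [ref]
        else if targets.all (fun t => (PySem.Str.pyGet? t i).getD ' ' == ref) then String.ofList [ref]
        else rep_char]) := by
  funext acc i
  simp only
  split_ifs <;> rfl

-- ===== VERDICT (by name: the statement is the Claim_ definition above) =====
theorem factorize_target_names_py_spec : Claim_equal_factorize_target_names_py := by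
  intro targets rep_char ignored_char concat_char _dom hpre
  unfold Spec_factorize_target_names_py factorize_target_names_py factorize_target_names_py_alt
  match targets with
  | [] => simp
  | [t] => simp
  | t0 :: t1 :: ts =>
    simp only [List.isEmpty_cons, if_neg Bool.false_ne_true, List.length_cons, List.headD_cons]
    have hlen2 : ((ts.length + 1 + 1 : Nat) == 1) = false := by simp
    rw [hlen2]
    simp only [if_neg Bool.false_ne_true]
    by_cases hall : ((t0 :: t1 :: ts).all fun t => PySem.Str.len t == PySem.Str.len t0) = true
    · -- equal-length branch
      have hany : ((t0 :: t1 :: ts).any fun t => PySem.Str.len t != PySem.Str.len t0) = false := by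
        simp only [List.all_eq_true] at hall
        simp only [List.any_eq_false]
        intro t ht
        simpa using hall t ht
      rw [hall, hany]
      simp only [Bool.not_true, if_neg Bool.false_ne_true]
      have hlens : ∀ t ∈ (t0 :: t1 :: ts), t.toList.length = t0.toList.length := by
        simp only [List.all_eq_true] at hall
        intro t ht
        have := hall t ht
        rw [PySem.Str.len_eq, PySem.Str.len_eq] at this
        exact_mod_cast beq_iff_eq.mp this
      have hnn : PySem.Str.len t0 = ((t0.toList.length : Nat) : Int) := PySem.Str.len_eq t0
      -- A side: a map over range
      rw [hnn, PySem.List.pyRange_zero_natCast, A_body_eq]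
      simp only [List.foldl_map]
      rw [PySem.List.foldl_append_singleton_eq_map]
      -- B side: enumerate as a map over range
      rw [PySem.List.enumerate_eq_map_pyRange (d := ' ')]
      rw [PySem.List.len_eq, PySem.List.pyRange_zero_natCast]
      simp only [List.map_map, List.nil_append]
      congr 1
      apply List.map_congr_left
      intro k hk
      rw [List.mem_range] at hk
      simp only [Function.comp]
      have hget0 : (PySem.Str.pyGet? t0 (k : Int)).getD ' ' = t0.toList[k] := by
        rw [PySem.Str.pyGet?_natCast, List.getElem?_eq_getElem hk]
        rfl
      have hgetD : PySem.List.pyGetD t0.toList ((k : Nat) : Int) ' ' = t0.toList[k] := by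
        rw [PySem.List.pyGetD_natCast, List.getD_eq_getElem?_getD, List.getElem?_eq_getElem hk]
        rfl
      rw [hget0, hgetD]
      have hset : (PySem.Set.contains (pvDiffSet t0.toList (t1 :: ts)) ((k : Nat) : Int)) =
          decide (∃ t ∈ (t1 :: ts), t.toList[k]? ≠ some t0.toList[k]) := by
        by_cases hm : ((k : Nat) : Int) ∈ pvDiffSet t0.toList (t1 :: ts)
        · rw [(PySem.Set.contains_iff _ _).mpr hm]
          have := (mem_pvDiffSet_nat t0.toList (t1 :: ts) k hk
            (fun t ht => hlens t (List.mem_cons_of_mem t0 ht))).mp hm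
          exact (decide_eq_true this).symm
        · have hc : PySem.Set.contains (pvDiffSet t0.toList (t1 :: ts)) ((k : Nat) : Int) = false := by
            cases hcc : PySem.Set.contains (pvDiffSet t0.toList (t1 :: ts)) ((k : Nat) : Int)
            · rfl
            · exact absurd ((PySem.Set.contains_iff _ _).mp hcc) hm
          rw [hc]
          have := (mem_pvDiffSet_nat t0.toList (t1 :: ts) k hk
            (fun t ht => hlens t (List.mem_cons_of_mem t0 ht))).not.mp hm
          exact (decide_eq_false this).symm
      rw [hset]
      have hcommon : ((t0 :: t1 :: ts).all fun t => (PySem.Str.pyGet? t (k : Int)).getD ' ' == t0.toList[k]) =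
          !decide (∃ t ∈ (t1 :: ts), t.toList[k]? ≠ some t0.toList[k]) := by
        simp only [List.all_cons, hget0, beq_self_eq_true, Bool.true_and]
        by_cases hex : ∃ t ∈ (t1 :: ts), t.toList[k]? ≠ some t0.toList[k]
        · obtain ⟨t, ht, hne⟩ := hex
          have : ((t1 :: ts).all fun t => (PySem.Str.pyGet? t (k : Int)).getD ' ' == t0.toList[k]) = false := by
            rw [List.all_eq_false]
            refine ⟨t, ht, ?_⟩
            rw [PySem.Str.pyGet?_natCast]
            have hkt : k < t.toList.length := by
              rw [hlens t (List.mem_cons_of_mem t0 ht)]; omega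
            rw [List.getElem?_eq_getElem hkt] at hne ⊢
            simp only [Option.getD_some]
            simpa using fun hc => hne (by rw [hc])
          rw [decide_eq_true (show ∃ u ∈ (t1 :: ts), u.toList[k]? ≠ some t0.toList[k] from ⟨t, ht, hne⟩)]
          simpa using this
        · have : ((t1 :: ts).all fun t => (PySem.Str.pyGet? t (k : Int)).getD ' ' == t0.toList[k]) = true := by
            rw [List.all_eq_true]
            intro t ht
            simp only [not_exists, not_and, not_not] at hex
            have := hex t ht
            rw [PySem.Str.pyGet?_natCast, this]
            simp
          rw [decide_eq_false hex]
          simpa using this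
      rw [hcommon]
      cases hig : ignored_char.contains (String.ofList [t0.toList[k]]) <;>
        cases hdx : decide (∃ t ∈ (t1 :: ts), t.toList[k]? ≠ some t0.toList[k]) <;>
          simp [hig, hdx]
    · -- length-mismatch branch
      have hany : ((t0 :: t1 :: ts).any fun t => PySem.Str.len t != PySem.Str.len t0) = true := by
        simp only [List.all_eq_true, not_forall] at hall
        rcases hall with ⟨t, ht, hne⟩
        exact List.any_eq_true.mpr ⟨t, ht, by simpa using hne⟩
      rw [eq_false_of_ne_true hall, hany]
      simp
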